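-- pv_equiv track=rewrite | github.com/Michal0ss/WDI | WDI_algo/z34.py | check_amount_digits
-- ===== SOURCE A (Python) =====
-- def check_amount_digits(n):
--     original_n = n
--     i=0
--     while original_n>0:
--         i += 1
--         original_n//=10
--
--     while n>0:
--         digit=n%10
--         if digit==i:
--             return True
--         n//=10
--     return False
-- ===== SOURCE B (Python) =====
-- def check_amount_digits(n):
--     if n <= 0:
--         return False
--     s = str(n)
--     length = len(s)
--     return any(int(ch) == length for ch in s)
-- ===== Notes on version B (the rewrite author's own statement) =====
-- stated objective: idiomatic
-- what changed: B replaces A's digit-counting while-loop by len(str(n)) and A's second modular-extraction loop by a single any() over the characters of the decimal string.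
import Mathlib
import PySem

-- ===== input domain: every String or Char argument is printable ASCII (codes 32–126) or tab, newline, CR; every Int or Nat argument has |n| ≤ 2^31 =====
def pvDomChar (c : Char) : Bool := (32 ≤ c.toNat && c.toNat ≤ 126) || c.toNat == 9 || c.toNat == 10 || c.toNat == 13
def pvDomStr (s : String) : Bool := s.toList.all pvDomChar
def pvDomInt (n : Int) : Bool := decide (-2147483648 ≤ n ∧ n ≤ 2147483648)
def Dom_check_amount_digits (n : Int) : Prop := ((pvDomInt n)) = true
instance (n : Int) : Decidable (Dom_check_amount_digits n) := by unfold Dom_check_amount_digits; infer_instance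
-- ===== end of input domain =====

-- B: replaces A's digit-counting loop by the length of str(n) and A's modular
-- digit-extraction loop by a single any() over the characters (idiomatic, same cost).

-- ===== PORT A =====
-- first while loop: count the digits of original_n
def pvCountLoop (n : Int) : Int :=
  if h : 0 < n then pvCountLoop (PySem.Int.floordiv n 10) + 1 else 0
  termination_by n.toNat
  decreasing_by
    rw [PySem.Int.floordiv_eq_ediv_of_pos (by norm_num : (0:Int) < 10)]
    omega

-- second while loop: look for a digit equal to i
def pvScanLoop (n i : Int) : Bool :=
  if h : 0 < n then
    if PySem.Int.mod n 10 = i then true else pvScanLoop (PySem.Int.floordiv n 10) i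
  else false
  termination_by n.toNat
  decreasing_by
    rw [PySem.Int.floordiv_eq_ediv_of_pos (by norm_num : (0:Int) < 10)]
    omega

def check_amount_digits (n : Int) : Bool := pvScanLoop n (pvCountLoop n)

-- ===== PORT B =====
def check_amount_digits_alt (n : Int) : Bool :=
  if n ≤ 0 then false
  else
    let cs := PySem.Int.toChars n          -- str(n)
    cs.any (fun c => PySem.Int.ofChars? [c] == some (cs.length : Int))

-- ===== PRECONDITION & SPEC =====
def Spec_check_amount_digits (n : Int) (out : Bool) : Prop := out = check_amount_digits_alt n
instance (n : Int) (out : Bool) : Decidable (Spec_check_amount_digits n out) := by unfold Spec_check_amount_digits; infer_instance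

-- ===== CLAIM (what is proved, stated in full; the proofs are below) =====
def Claim_equal_check_amount_digits : Prop := ∀ (n : Int), Dom_check_amount_digits n → Spec_check_amount_digits n (check_amount_digits n)

-- ===== LEMMAS AND PROOFS =====

-- closed recursion computing the same list as Nat.toDigits 10 (proved below)
def pvDigitsSpec (m : Nat) : List Char :=
  if h : m < 10 then [Nat.digitChar m]
  else pvDigitsSpec (m / 10) ++ [Nat.digitChar (m % 10)]
  termination_by m
  decreasing_by exact Nat.div_lt_self (by omega) (by norm_num)

lemma pvToDigitsCore_eq (f : Nat) : ∀ n l, n < f →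
    Nat.toDigitsCore 10 f n l = pvDigitsSpec n ++ l := by
  induction f with
  | zero => intro n l h; omega
  | succ f ih =>
    intro n l h
    rw [Nat.toDigitsCore]
    by_cases h0 : n / 10 = 0
    · have hn : n < 10 := by omega
      rw [if_pos h0, pvDigitsSpec, dif_pos hn, Nat.mod_eq_of_lt hn]
      simp
    · have hn : ¬ n < 10 := by omega
      rw [if_neg h0, ih (n / 10) _ (by omega)]
      conv_rhs => rw [pvDigitsSpec, dif_neg hn]
      simp

lemma pvToDigits_eq (m : Nat) : Nat.toDigits 10 m = pvDigitsSpec m := by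
  have := pvToDigitsCore_eq (m + 1) m [] (by omega)
  simpa [Nat.toDigits] using this

lemma pvCountLoop_natCast (m : Nat) (hm : 0 < m) :
    pvCountLoop (m : Int) = ((pvDigitsSpec m).length : Int) := by
  induction m using Nat.strong_induction_on with
  | _ m ih =>
    rw [pvCountLoop, dif_pos (by exact_mod_cast hm)]
    have hfd : PySem.Int.floordiv (m : Int) 10 = ((m / 10 : Nat) : Int) := by
      exact_mod_cast PySem.Int.floordiv_natCast m 10
    rw [hfd]
    by_cases h : m < 10
    · have h0 : m / 10 = 0 := Nat.div_eq_of_lt h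
      rw [h0, pvDigitsSpec, dif_pos h]
      rw [pvCountLoop, dif_neg (by norm_num)]
      simp
    · have hpos : 0 < m / 10 := Nat.div_pos (by omega) (by norm_num)
      rw [ih (m / 10) (Nat.div_lt_self (by omega) (by norm_num)) hpos]
      conv_rhs => rw [pvDigitsSpec, dif_neg h]
      simp

lemma pvOfChars_digitChar (d : Nat) (hd : d < 10) :
    PySem.Int.ofChars? [Nat.digitChar d] = some (d : Int) := by
  interval_cases d <;> decide

lemma pvScanLoop_natCast (m : Nat) (hm : 0 < m) (i : Int) :
    pvScanLoop (m : Int) i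
      = (pvDigitsSpec m).any (fun c => PySem.Int.ofChars? [c] == some i) := by
  induction m using Nat.strong_induction_on with
  | _ m ih =>
    rw [pvScanLoop, dif_pos (by exact_mod_cast hm)]
    have hfd : PySem.Int.floordiv (m : Int) 10 = ((m / 10 : Nat) : Int) := by
      exact_mod_cast PySem.Int.floordiv_natCast m 10
    have hmd : PySem.Int.mod (m : Int) 10 = ((m % 10 : Nat) : Int) := by
      exact_mod_cast PySem.Int.mod_natCast m 10
    rw [hfd, hmd]
    by_cases h : m < 10
    · have h0 : m / 10 = 0 := Nat.div_eq_of_lt h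
      have hmod : m % 10 = m := Nat.mod_eq_of_lt h
      rw [pvDigitsSpec, dif_pos h, hmod]
      rw [List.any_cons, List.any_nil, pvOfChars_digitChar m h]
      by_cases hi : (m : Int) = i
      · simp [hi]
      · rw [if_neg hi, h0]
        rw [pvScanLoop, dif_neg (by norm_num)]
        simp [hi]
    · have hpos : 0 < m / 10 := Nat.div_pos (by omega) (by norm_num)
      rw [pvDigitsSpec, dif_neg h, List.any_append, List.any_cons, List.any_nil,
        pvOfChars_digitChar (m % 10) (Nat.mod_lt m (by norm_num))]
      by_cases hi : ((m % 10 : Nat) : Int) = i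
      · simp [hi]
      · rw [if_neg hi, ih (m / 10) (Nat.div_lt_self (by omega) (by norm_num)) hpos]
        simp
        intro hx
        push_cast at hi
        exact absurd hx hi

-- ===== VERDICT (by name: the statement is the Claim_ definition above) =====
theorem check_amount_digits_spec : Claim_equal_check_amount_digits := by
  intro n _
  unfold Spec_check_amount_digits check_amount_digits check_amount_digits_alt
  by_cases hn : n ≤ 0
  · rw [if_pos hn, pvScanLoop, dif_neg (by omega)]
  · rw [if_neg hn]
    have hpos : 0 < n := by omega
    have hcast : ((n.toNat : Nat) : Int) = n := Int.toNat_of_nonneg (le_of_lt hpos)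
    have hmpos : 0 < n.toNat := by omega
    have hcs : PySem.Int.toChars n = pvDigitsSpec n.toNat := by
      rw [PySem.Int.toChars, if_neg (by omega), pvToDigits_eq]
    show pvScanLoop n (pvCountLoop n)
      = (PySem.Int.toChars n).any
          (fun c => PySem.Int.ofChars? [c] == some ((PySem.Int.toChars n).length : Int))
    rw [hcs, ← hcast, pvScanLoop_natCast n.toNat hmpos, pvCountLoop_natCast n.toNat hmpos,
      Int.toNat_natCast]
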